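-- pv_equiv track=rewrite | github.com/Bloodwingv2/Python-Assignments-SRH | Disk.py | disk_optimize
-- ===== SOURCE A (Python) =====
-- def disk_optimize(disks):
--     """Optimize Disk by comparing each disk with every other disk to find all possible stacks and to select the best one"""
--     stack = []
--     max_height = 0
--     best_stacks = [] # As our problem requires us to constantly check all possibilities we need a variable to track best stacks
--
--     for i in range(len(disks)): # Iterate through all disks
--         stack = [disks[i]]
--         height = disks[i][2]
--
--         for j in range(i+1, len(disks)):
--             top_of_stack = stack[-1]
--             new_disk = disks[j] # Use this disk to compare each disk
--
--             if (new_disk[0] > top_of_stack[0] and new_disk[1] > top_of_stack[1] and new_disk[2] > top_of_stack[2]): # Check if new disk fulfils conditions to be added to the stack simultanoeusly also add the height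
--                 stack.append(new_disk)
--                 height += new_disk[2]
--
--         # After all iterations are completed for inner loop check if the current stack is the best stack
--         if height > max_height: # Update best height like we do in 1-D arrays if new height is greater than max height, replace old stack with new valeus
--             max_height = height
--             best_stacks = stack[::-1] # Reverse stack to have the smallest disk at the bottom
--         elif height == max_height: # If height is equal to max height, we have found another optimal stack, add it to best stacks
--             best_stacks += stack[::-1] # Reverse and add entire stack to the best_stacks as its a valid stack with the max height, removed append as it was adding additional brackets, this was a very annoying bug
--
--     return best_stacks
-- ===== SOURCE B (Python) =====
-- def disk_optimize(disks):
--     """Greedy strictly-increasing disk stacks via a recursive chain builder over suffixes."""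
--     def chain(d, rest):
--         # first disk in rest strictly dominating d, then recurse on what follows it
--         for k, e in enumerate(rest):
--             if e[0] > d[0] and e[1] > d[1] and e[2] > d[2]:
--                 return [d] + chain(e, rest[k + 1:])
--         return [d]
--
--     max_height = 0
--     best_stacks = []
--     rest = disks
--     while rest:
--         d, rest = rest[0], rest[1:]
--         c = chain(d, rest)
--         h = sum(x[2] for x in c)
--         if h > max_height:
--             max_height = h
--             best_stacks = c[::-1]
--         elif h == max_height:
--             best_stacks = best_stacks + c[::-1]
--     return best_stacks
-- ===== Notes on version B (the rewrite author's own statement) =====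
-- stated objective: alternative
-- what changed: Replaces A's index-based nested scan that mutates a stack and accumulates height with a recursive chain builder over list suffixes (find first dominating disk, recurse on its tail) plus a separate sum for the height.
import Mathlib
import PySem

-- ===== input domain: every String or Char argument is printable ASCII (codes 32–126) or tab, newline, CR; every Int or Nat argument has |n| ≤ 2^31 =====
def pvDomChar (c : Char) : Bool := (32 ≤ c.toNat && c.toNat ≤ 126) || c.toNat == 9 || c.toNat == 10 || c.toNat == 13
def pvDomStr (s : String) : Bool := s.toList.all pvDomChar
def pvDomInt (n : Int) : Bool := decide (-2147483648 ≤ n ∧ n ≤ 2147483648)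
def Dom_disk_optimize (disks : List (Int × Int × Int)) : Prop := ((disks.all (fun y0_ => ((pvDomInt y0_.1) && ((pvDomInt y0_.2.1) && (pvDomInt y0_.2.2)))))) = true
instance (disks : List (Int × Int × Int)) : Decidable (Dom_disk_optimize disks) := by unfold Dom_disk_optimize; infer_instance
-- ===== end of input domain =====

-- B replaces A's index-based greedy stack mutation with a recursive chain builder over
-- list suffixes; objective: alternative decomposition (same cost).

-- ===== PORT A =====
-- literal transliteration of A: outer fold over range(len), inner fold over range(i+1, len)
-- mutating (stack, height); stack[-1] read as getLastD (stack is never empty).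
def disk_optimize (disks : List (Int × Int × Int)) : List (Int × Int × Int) :=
  let n : Int := disks.length
  let res := (PySem.List.pyRange 0 n 1).foldl (fun (acc : Int × List (Int × Int × Int)) i =>
    match PySem.List.pyGet? disks i with
    | none => acc  -- unreachable: i is in range
    | some d =>
      let inner := (PySem.List.pyRange (i + 1) n 1).foldl
        (fun (sh : List (Int × Int × Int) × Int) j =>
          match PySem.List.pyGet? disks j with
          | none => sh  -- unreachable: j is in range
          | some nd =>
            let top := sh.1.getLastD (0, 0, 0)
            if nd.1 > top.1 ∧ nd.2.1 > top.2.1 ∧ nd.2.2 > top.2.2 then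
              (sh.1 ++ [nd], sh.2 + nd.2.2)
            else sh) ([d], d.2.2)
      let stack := inner.1
      let height := inner.2
      if height > acc.1 then (height, (PySem.List.slice? stack none none (-1)).getD [])
      else if height = acc.1 then (acc.1, acc.2 ++ (PySem.List.slice? stack none none (-1)).getD [])
      else acc) (0, [])
  res.2

-- ===== PORT B =====
-- B-side helpers: scan rest for the first disk strictly dominating d, returning it and its tail.
def findDom (d : Int × Int × Int) : List (Int × Int × Int) → Option ((Int × Int × Int) × List (Int × Int × Int))
  | [] => none
  | e :: rest => if e.1 > d.1 ∧ e.2.1 > d.2.1 ∧ e.2.2 > d.2.2 then some (e, rest) else findDom d rest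

theorem findDom_shrinks (d e : Int × Int × Int) :
    ∀ (rest rest' : List (Int × Int × Int)), findDom d rest = some (e, rest') → rest'.length < rest.length := by
  intro rest
  induction rest with
  | nil => intro rest' h; simp [findDom] at h
  | cons x xs ih =>
    intro rest' h
    simp only [findDom] at h
    split at h
    · cases h; simp
    · exact Nat.lt_trans (ih rest' h) (by simp)

def chainB (d : Int × Int × Int) (rest : List (Int × Int × Int)) : List (Int × Int × Int) :=
  match hm : findDom d rest with
  | none => [d]
  | some (e, rest') => d :: chainB e rest'
termination_by rest.length
decreasing_by exact findDom_shrinks d e rest rest' hm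

def heightOf (c : List (Int × Int × Int)) : Int := (c.map (fun x => x.2.2)).sum

def altLoop : List (Int × Int × Int) → Int × List (Int × Int × Int) → Int × List (Int × Int × Int)
  | [], acc => acc
  | d :: rest, acc =>
    let c := chainB d rest
    let h := heightOf c
    altLoop rest
      (if h > acc.1 then (h, c.reverse)
       else if h = acc.1 then (acc.1, acc.2 ++ c.reverse)
       else acc)

def disk_optimize_alt (disks : List (Int × Int × Int)) : List (Int × Int × Int) :=
  (altLoop disks (0, [])).2

-- ===== PRECONDITION & SPEC =====
def Spec_disk_optimize (disks : List (Int × Int × Int)) (out : List (Int × Int × Int)) : Prop := out = disk_optimize_alt disks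
instance (disks : List (Int × Int × Int)) (out : List (Int × Int × Int)) : Decidable (Spec_disk_optimize disks out) := by unfold Spec_disk_optimize; infer_instance

-- ===== CLAIM (what is proved, stated in full; the proofs are below) =====
def Claim_equal_disk_optimize : Prop := ∀ (disks : List (Int × Int × Int)), Dom_disk_optimize disks → Spec_disk_optimize disks (disk_optimize disks)

-- ===== LEMMAS AND PROOFS =====

-- the inner-loop body of A, index form and list form
def innerIdx (disks : List (Int × Int × Int)) (sh : List (Int × Int × Int) × Int) (j : Int) :
    List (Int × Int × Int) × Int :=
  match PySem.List.pyGet? disks j with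
  | none => sh
  | some nd =>
    let top := sh.1.getLastD (0, 0, 0)
    if nd.1 > top.1 ∧ nd.2.1 > top.2.1 ∧ nd.2.2 > top.2.2 then (sh.1 ++ [nd], sh.2 + nd.2.2)
    else sh

def innerList (sh : List (Int × Int × Int) × Int) (nd : Int × Int × Int) :
    List (Int × Int × Int) × Int :=
  let top := sh.1.getLastD (0, 0, 0)
  if nd.1 > top.1 ∧ nd.2.1 > top.2.1 ∧ nd.2.2 > top.2.2 then (sh.1 ++ [nd], sh.2 + nd.2.2)
  else sh

-- index fold over range(k, n) equals list fold over drop k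
theorem inner_idx_to_list (disks : List (Int × Int × Int)) :
    ∀ (k : Nat) (sh : List (Int × Int × Int) × Int),
      (PySem.List.pyRange (k : Int) disks.length 1).foldl (innerIdx disks) sh
        = (disks.drop k).foldl innerList sh := by
  intro k
  induction hfuel : disks.length - k generalizing k with
  | zero =>
    intro sh
    have hk : disks.length ≤ k := by omega
    rw [PySem.List.pyRange_one_eq_nil (by exact_mod_cast hk), List.drop_eq_nil_of_le hk]
    simp
  | succ m ih =>
    intro sh
    have hk : k < disks.length := by omega
    rw [PySem.List.pyRange_one_cons (by exact_mod_cast hk)]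
    have hdrop : disks.drop k = disks[k] :: disks.drop (k + 1) :=
      List.drop_eq_getElem_cons hk
    rw [hdrop]
    simp only [List.foldl_cons]
    have h1 : ((k : Int) + 1) = ((k + 1 : Nat) : Int) := by push_cast; ring
    have hget : PySem.List.pyGet? disks (k : Int) = some disks[k] := by
      rw [PySem.List.pyGet?_natCast]; simp [hk]
    have hbody : innerIdx disks sh (k : Int) = innerList sh disks[k] := by
      simp [innerIdx, innerList, hget]
    rw [hbody, h1, ih (k + 1) (by omega)]


theorem chainB_cons_pos (d x : Int × Int × Int) (xs : List (Int × Int × Int))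
    (hd : x.1 > d.1 ∧ x.2.1 > d.2.1 ∧ x.2.2 > d.2.2) :
    chainB d (x :: xs) = d :: chainB x xs := by
  have hf : findDom d (x :: xs) = some (x, xs) := by simp [findDom, hd]
  rw [chainB]
  split
  · next h => rw [hf] at h; cases h
  · next e r h => rw [hf] at h; cases h; rfl

theorem chainB_cons_neg (d x : Int × Int × Int) (xs : List (Int × Int × Int))
    (hd : ¬ (x.1 > d.1 ∧ x.2.1 > d.2.1 ∧ x.2.2 > d.2.2)) :
    chainB d (x :: xs) = chainB d xs := by
  have hf : findDom d (x :: xs) = findDom d xs := by simp [findDom, hd]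
  rw [chainB]
  conv_rhs => rw [chainB]
  split
  · next h =>
    rw [hf] at h
    split
    · rfl
    · next e r h2 => rw [h2] at h; cases h
  · next e r h =>
    rw [hf] at h
    split
    · next h2 => rw [h2] at h; cases h
    · next e2 r2 h2 => rw [h2] at h; cases h; rfl

-- the greedy accumulation from (acc ++ [d], h) over xs yields acc ++ chainB d xs,
-- adding exactly the height of the chain's tail
theorem inner_list_chain :
    ∀ (xs acc : List (Int × Int × Int)) (d : Int × Int × Int) (h : Int),
      xs.foldl innerList (acc ++ [d], h)
        = (acc ++ chainB d xs, h - d.2.2 + heightOf (chainB d xs)) := by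
  intro xs
  induction xs with
  | nil =>
    intro acc d h
    simp [chainB, findDom, heightOf]
  | cons x xs ih =>
    intro acc d h
    simp only [List.foldl_cons]
    by_cases hd : x.1 > d.1 ∧ x.2.1 > d.2.1 ∧ x.2.2 > d.2.2
    · have hchain : chainB d (x :: xs) = d :: chainB x xs := chainB_cons_pos d x xs hd
      have step : innerList (acc ++ [d], h) x = ((acc ++ [d]) ++ [x], h + x.2.2) := by
        simp [innerList, hd]
      rw [step, ih (acc ++ [d]) x (h + x.2.2), hchain]
      simp only [Prod.mk.injEq]
      exact ⟨by simp, by simp [heightOf]; ring⟩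
    · have hchain : chainB d (x :: xs) = chainB d xs := chainB_cons_neg d x xs hd
      have step : innerList (acc ++ [d], h) x = (acc ++ [d], h) := by
        simp [innerList, hd]
      rw [step, ih acc d h, hchain]

-- the outer-loop body of A
def outerIdx (disks : List (Int × Int × Int)) (acc : Int × List (Int × Int × Int)) (i : Int) :
    Int × List (Int × Int × Int) :=
  match PySem.List.pyGet? disks i with
  | none => acc
  | some d =>
    let inner := (PySem.List.pyRange (i + 1) (disks.length : Int) 1).foldl (innerIdx disks) ([d], d.2.2)
    let stack := inner.1
    let height := inner.2
    if height > acc.1 then (height, (PySem.List.slice? stack none none (-1)).getD [])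
    else if height = acc.1 then (acc.1, acc.2 ++ (PySem.List.slice? stack none none (-1)).getD [])
    else acc

theorem outer_eq (disks : List (Int × Int × Int)) :
    ∀ (k : Nat) (acc : Int × List (Int × Int × Int)),
      (PySem.List.pyRange (k : Int) disks.length 1).foldl (outerIdx disks) acc
        = altLoop (disks.drop k) acc := by
  intro k
  induction hfuel : disks.length - k generalizing k with
  | zero =>
    intro acc
    have hk : disks.length ≤ k := by omega
    rw [PySem.List.pyRange_one_eq_nil (by exact_mod_cast hk), List.drop_eq_nil_of_le hk]
    simp [altLoop]
  | succ m ih =>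
    intro acc
    have hk : k < disks.length := by omega
    rw [PySem.List.pyRange_one_cons (by exact_mod_cast hk)]
    have hdrop : disks.drop k = disks[k] :: disks.drop (k + 1) :=
      List.drop_eq_getElem_cons hk
    rw [hdrop]
    simp only [List.foldl_cons]
    have h1 : ((k : Int) + 1) = ((k + 1 : Nat) : Int) := by push_cast; ring
    have hget : PySem.List.pyGet? disks (k : Int) = some disks[k] := by
      rw [PySem.List.pyGet?_natCast]; simp [hk]
    set d := disks[k] with hdk
    have hinner :
        (PySem.List.pyRange ((k : Int) + 1) (disks.length : Int) 1).foldl (innerIdx disks) ([d], d.2.2)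
          = (chainB d (disks.drop (k + 1)), heightOf (chainB d (disks.drop (k + 1)))) := by
      rw [h1, inner_idx_to_list disks (k + 1) ([d], d.2.2)]
      have := inner_list_chain (disks.drop (k + 1)) [] d d.2.2
      simpa using this
    have : outerIdx disks acc (k : Int)
        = (let c := chainB d (disks.drop (k + 1));
           let h := heightOf c;
           if h > acc.1 then (h, c.reverse)
           else if h = acc.1 then (acc.1, acc.2 ++ c.reverse)
           else acc) := by
      simp only [outerIdx, hget, hinner, PySem.List.slice?_none_none_neg_one, Option.getD_some]
    rw [this]
    simp only [altLoop]
    rw [h1, ih (k + 1) (by omega)]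

-- A's port is exactly the index fold with outerIdx
theorem diskA_eq_fold (disks : List (Int × Int × Int)) :
    disk_optimize disks
      = ((PySem.List.pyRange 0 (disks.length : Int) 1).foldl (outerIdx disks) (0, [])).2 := by
  rfl

theorem disk_optimize_spec : Claim_equal_disk_optimize := by
  intro disks _
  unfold Spec_disk_optimize disk_optimize_alt
  have h := outer_eq disks 0 (0, [])
  simp only [Nat.cast_zero, List.drop_zero] at h
  rw [diskA_eq_fold, h]
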